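-- pv_equiv track=rewrite | github.com/joannamagdalena/games | deegan_packel.py | player_set_partition
-- ===== SOURCE A (Python) =====
-- def player_set_partition(player_set):
--     partition = []
--     for p in range(0, len(player_set)):
--         exists_set = False
--         for s in partition:
--             if player_set[p] == player_set[s[0]]:
--                 s.append(p)
--                 exists_set = True
--
--         if not exists_set:
--             partition.append([p])
--
--     weights = sorted(set(player_set), reverse=True)
--     sorted_partition = []
--     for w in weights:
--         for s in partition:
--             if player_set[s[0]] == w:
--                 sorted_partition.append(s)
--                 break
--
--     return sorted_partition
-- ===== SOURCE B (Python) =====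
-- def player_set_partition(player_set):
--     # One pass grouping value -> list of indices (insertion order = first occurrence),
--     # then sort the distinct values descending: O(n log n) instead of A's O(n^2).
--     groups = {}
--     for i, v in enumerate(player_set):
--         groups.setdefault(v, []).append(i)
--     return [groups[w] for w in sorted(groups, reverse=True)]
-- ===== Notes on version B (the rewrite author's own statement) =====
-- stated objective: faster
-- what changed: replaces the quadratic scan-all-groups-per-element loop and the per-weight linear search by a single dict-grouping pass plus one sort of the distinct values
import Mathlib
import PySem

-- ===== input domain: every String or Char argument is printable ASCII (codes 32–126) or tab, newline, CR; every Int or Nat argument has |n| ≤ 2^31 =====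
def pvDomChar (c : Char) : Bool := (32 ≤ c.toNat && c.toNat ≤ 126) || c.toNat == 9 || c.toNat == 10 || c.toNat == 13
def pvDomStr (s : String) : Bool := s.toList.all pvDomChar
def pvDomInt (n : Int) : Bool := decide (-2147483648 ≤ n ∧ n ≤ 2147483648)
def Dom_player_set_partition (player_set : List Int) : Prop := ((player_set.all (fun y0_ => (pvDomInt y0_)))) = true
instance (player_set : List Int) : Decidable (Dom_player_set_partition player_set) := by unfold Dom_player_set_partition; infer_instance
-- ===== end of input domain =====

-- B replaces A's scan-all-groups-per-element partition loop (and the per-weight linear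
-- search over the partition) by one dict-grouping pass plus a sort of the distinct values.

-- ===== PORT A =====
-- A-side helper: the body of the outer 'for p in range(0, len(player_set))' loop; the
-- inner 'for s in partition' loop is the foldl whose state is (rebuilt partition, exists_set).
def pvAstep (ps : List Int) (partition : List (List Int)) (p : Int) : List (List Int) :=
  let st : List (List Int) × Bool :=
    partition.foldl
      (fun st s =>
        if PySem.List.pyGetD ps p 0 == PySem.List.pyGetD ps (PySem.List.pyGetD s 0 0) 0
        then (st.1 ++ [s ++ [p]], true)
        else (st.1 ++ [s], st.2))
      ([], false)
  if st.2 then st.1 else st.1 ++ [[p]]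

def player_set_partition (player_set : List Int) : List (List Int) :=
  let partition : List (List Int) :=
    (PySem.List.pyRange 0 (player_set.length : Int)).foldl (pvAstep player_set) []
  let weights := PySem.List.sorted (PySem.Set.ofList player_set) (fun x => x) true
  weights.foldl
    (fun acc w =>
      match partition.find?
          (fun s => PySem.List.pyGetD player_set (PySem.List.pyGetD s 0 0) 0 == w) with
      | some s => acc ++ [s]
      | none => acc)
    []

-- ===== PORT B =====
def player_set_partition_alt (player_set : List Int) : List (List Int) :=
  let groups : PySem.Dict Int (List Int) :=
    (PySem.List.enumerate player_set).foldl
      (fun d p => d.modify p.2 [] (fun g => g ++ [p.1]))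
      PySem.Dict.empty
  (PySem.List.sorted groups.keys (fun x => x) true).map (fun w => groups.getD w [])

-- ===== PRECONDITION & SPEC =====
def Spec_player_set_partition (player_set : List Int) (out : List (List Int)) : Prop := out = player_set_partition_alt player_set
instance (player_set : List Int) (out : List (List Int)) : Decidable (Spec_player_set_partition player_set out) := by unfold Spec_player_set_partition; infer_instance

-- ===== CLAIM (what is proved, stated in full; the proofs are below) =====
def Claim_equal_player_set_partition : Prop := ∀ (player_set : List Int), Dom_player_set_partition player_set → Spec_player_set_partition player_set (player_set_partition player_set)

-- ===== LEMMAS AND PROOFS =====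

theorem pv_mem_take_iff (ps : List Int) (k : Nat) (w : Int) :
    w ∈ ps.take k ↔ ∃ i, i < k ∧ i < ps.length ∧ ps.getD i 0 = w := by
  constructor
  · intro h
    rcases List.mem_iff_getElem.mp h with ⟨j, hj, hje⟩
    have hl : j < k ∧ j < ps.length := by
      have := List.length_take (i := k) (l := ps); omega
    refine ⟨j, hl.1, hl.2, ?_⟩
    rw [List.getD_eq_getElem ps 0 hl.2]
    rw [List.getElem_take] at hje
    exact hje
  · rintro ⟨i, hik, hil, hv⟩
    have h2 : (ps.take k)[i]'(by simp; omega) = w := by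
      rw [List.getElem_take]
      rw [List.getD_eq_getElem ps 0 hil] at hv; exact hv
    exact h2 ▸ List.getElem_mem _

-- the group of indices below k whose value is w (Nat indices, and their Int casts)
def pvIdx (ps : List Int) (k : Nat) (w : Int) : List Nat :=
  (List.range k).filter (fun i => ps.getD i 0 == w)
def pvG (ps : List Int) (k : Nat) (w : Int) : List Int :=
  (pvIdx ps k w).map (fun i => (i : Int))

theorem pvIdx_ne_nil {ps : List Int} {k : Nat} {w : Int} (h : w ∈ ps.take k) :
    pvIdx ps k w ≠ [] := by
  rcases (pv_mem_take_iff ps k w).mp h with ⟨i, hik, hil, hv⟩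
  have : i ∈ pvIdx ps k w :=
    List.mem_filter.mpr ⟨List.mem_range.mpr hik, beq_iff_eq.mpr hv⟩
  exact List.ne_nil_of_mem this

theorem pv_head_val {ps : List Int} {k : Nat} {w : Int} (h : w ∈ ps.take k) :
    ps.getD ((pvIdx ps k w).headD 0) 0 = w := by
  have hne := pvIdx_ne_nil h
  have hm : (pvIdx ps k w).headD 0 ∈ pvIdx ps k w := by
    cases hl : pvIdx ps k w with
    | nil => exact absurd hl hne
    | cons a t => simp
  have hm' : (pvIdx ps k w).headD 0 ∈ (List.range k).filter (fun i => ps.getD i 0 == w) := hm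
  exact beq_iff_eq.mp (List.mem_filter.mp hm').2

theorem pv_cond_G {ps : List Int} {k : Nat} {w : Int} (h : w ∈ ps.take k) :
    PySem.List.pyGetD ps (PySem.List.pyGetD (pvG ps k w) 0 0) 0 = w := by
  have hne := pvIdx_ne_nil h
  cases hl : pvIdx ps k w with
  | nil => exact absurd hl hne
  | cons a t =>
      have : pvG ps k w = (a : Int) :: t.map (fun i => (i : Int)) := by simp [pvG, hl]
      rw [this]
      have h0 : PySem.List.pyGetD ((a : Int) :: t.map (fun i => (i : Int))) 0 0 = (a : Int) := by
        exact PySem.List.pyGetD_natCast ((a : Int) :: t.map (fun i => (i : Int))) 0 0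
      rw [h0, PySem.List.pyGetD_natCast]
      have := pv_head_val h
      rwa [hl] at this

theorem pv_inner_fold (cond : List Int → Bool) (p : Int)
    (P : List (List Int)) (acc : List (List Int)) (b : Bool) :
    P.foldl
        (fun st s => if cond s then (st.1 ++ [s ++ [p]], true) else (st.1 ++ [s], st.2))
        (acc, b)
      = (acc ++ P.map (fun s => if cond s then s ++ [p] else s), b || P.any cond) := by
  induction P generalizing acc b with
  | nil => simp
  | cons s t ih =>
      by_cases h : cond s <;> simp [h, ih]

theorem pvG_succ (ps : List Int) (k : Nat) (w : Int) :
    pvG ps (k+1) w = pvG ps k w ++ (if ps.getD k 0 == w then [(k : Int)] else []) := by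
  simp only [pvG, pvIdx, List.range_succ, List.filter_append]
  by_cases h : ps.getD k 0 = w <;> simp [List.getD] at h <;> simp [List.getD, h]

theorem pv_invariant (ps : List Int) (k : Nat) (hk : k ≤ ps.length) :
    (List.range k).foldl (fun P (i : Nat) => pvAstep ps P (i : Int)) []
      = (PySem.Set.ofList (ps.take k)).map (pvG ps k) := by
  induction k with
  | zero => simp
  | succ k ih =>
    have hk' : k ≤ ps.length := by omega
    have hkl : k < ps.length := by omega
    rw [List.range_succ, List.foldl_append, ih hk']
    set D := PySem.Set.ofList (ps.take k) with hD
    set v := ps.getD k 0 with hv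
    have htake : ps.take (k+1) = ps.take k ++ [v] := by
      rw [List.take_add_one, List.getElem?_eq_getElem hkl]
      simp [hv, List.getD, List.getElem?_eq_getElem hkl]
    simp only [List.foldl_cons, List.foldl_nil, pvAstep]
    rw [pv_inner_fold]
    have hc : ∀ w ∈ D, (PySem.List.pyGetD ps ((k : Int)) 0 ==
        PySem.List.pyGetD ps (PySem.List.pyGetD (pvG ps k w) 0 0) 0) = (v == w) := by
      intro w hw
      have hwt : w ∈ ps.take k := (PySem.Set.mem_ofList _ _).mp hw
      rw [pv_cond_G hwt, PySem.List.pyGetD_natCast]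
    have hmap : (D.map (pvG ps k)).map
          (fun s => if (PySem.List.pyGetD ps ((k : Int)) 0 ==
              PySem.List.pyGetD ps (PySem.List.pyGetD s 0 0) 0) then s ++ [(k : Int)] else s)
        = D.map (fun w => if v == w then pvG ps k w ++ [(k : Int)] else pvG ps k w) := by
      rw [List.map_map]
      refine List.map_congr_left (fun w hw => ?_)
      show (if (PySem.List.pyGetD ps ((k : Int)) 0 ==
          PySem.List.pyGetD ps (PySem.List.pyGetD (pvG ps k w) 0 0) 0)
          then pvG ps k w ++ [(k : Int)] else pvG ps k w) = _
      rw [hc w hw]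
    have hany : (D.map (pvG ps k)).any
          (fun s => PySem.List.pyGetD ps ((k : Int)) 0 ==
              PySem.List.pyGetD ps (PySem.List.pyGetD s 0 0) 0) = D.contains v := by
      rw [List.any_map]
      rw [PySem.List.any_congr_mem (g := fun w => v == w)
        (fun w hw => by simpa [Function.comp] using hc w hw)]
      exact List.any_beq
    rw [hmap, hany, htake, PySem.Set.ofList_append]
    have hsucc : ∀ w : Int, pvG ps (k+1) w
        = pvG ps k w ++ (if v == w then [(k : Int)] else []) := by
      intro w
      rw [pvG_succ, ← hv]
    by_cases hvD : v ∈ D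
    · have hcont : D.contains v = true := by
        simp only [PySem.Set.contains, List.contains_eq_mem]
        exact (by exact decide_eq_true hvD : _)
      have hupd : D.update [v] = D := by
        simp [PySem.Set.update, PySem.Set.add, hvD]
      rw [hupd]
      have hcond : (false || D.contains v) = true := by rw [Bool.false_or]; exact hcont
      rw [hcond, if_pos rfl]
      refine List.map_congr_left (fun w _ => ?_)
      rw [hsucc w]
      by_cases h : v = w <;> simp [h]
    · have hcont : D.contains v = false := by
        simp only [PySem.Set.contains, List.contains_eq_mem]
        exact decide_eq_false hvD
      have hupd : D.update [v] = D ++ [v] := by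
        simp [PySem.Set.update, PySem.Set.add, hvD]
      rw [hupd]
      have hcond : (false || D.contains v) = false := by rw [Bool.false_or]; exact hcont
      rw [hcond, if_neg (by simp)]
      rw [List.map_append]
      congr 1
      · refine List.map_congr_left (fun w hw => ?_)
        rw [hsucc w]
        have : v ≠ w := fun h => hvD (h ▸ hw)
        simp [this]
      · have hnil : pvIdx ps k v = [] := by
          refine List.filter_eq_nil_iff.mpr (fun i hi hp => ?_)
          have hik : i < k := List.mem_range.mp hi
          have hiv : ps.getD i 0 = v := by simpa using hp
          have : v ∈ ps.take k := (pv_mem_take_iff ps k v).mpr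
            ⟨i, hik, by omega, hiv⟩
          exact hvD ((PySem.Set.mem_ofList _ _).mpr this)
        have hGnil : pvG ps k v = [] := by simp [pvG, hnil]
        simp [hsucc v, hGnil]

theorem pv_find (w : Int) (g : Int → List Int) (Pred : List Int → Bool)
    (l : List Int) (hp : ∀ w' ∈ l, Pred (g w') = (w' == w)) (hm : w ∈ l) :
    (l.map g).find? Pred = some (g w) := by
  induction l with
  | nil => cases hm
  | cons a t ih =>
      by_cases ha : a = w
      · subst ha
        simp [hp a (by simp)]
      · have hfa : Pred (g a) = false := by
          rw [hp a (by simp)]; simp [ha]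
        have hm' : w ∈ t := by
          rcases List.mem_cons.mp hm with h | h
          · exact absurd h.symm ha
          · exact h
        simp [hfa, ih (fun w' hw' => hp w' (by simp [hw'])) hm']

theorem pv_enum_eq (ps : List Int) (s : Int) :
    PySem.List.enumerate ps s
      = (List.range ps.length).map (fun i : Nat => (s + (i : Int), ps.getD i 0)) := by
  induction ps generalizing s with
  | nil => simp [PySem.List.enumerate]
  | cons x t ih =>
      simp [PySem.List.enumerate, ih, List.range_succ_eq_map, List.map_map]
      intro a _
      ring

theorem pv_enum_eq0 (ps : List Int) :
    PySem.List.enumerate ps 0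
      = (List.range ps.length).map (fun i : Nat => ((i : Int), ps.getD i 0)) := by
  rw [pv_enum_eq]
  simp

theorem pv_A_eq (ps : List Int) :
    player_set_partition ps
      = (PySem.List.sorted (PySem.Set.ofList ps) (fun x => x) true).map (pvG ps ps.length) := by
  have hpart : (PySem.List.pyRange 0 (ps.length : Int)).foldl (pvAstep ps) []
      = (PySem.Set.ofList ps).map (pvG ps ps.length) := by
    rw [PySem.List.pyRange_zero_natCast, List.foldl_map]
    have h := pv_invariant ps ps.length le_rfl
    rwa [List.take_length] at h
  simp only [player_set_partition]
  rw [hpart]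
  have hsel : ∀ w ∈ PySem.List.sorted (PySem.Set.ofList ps) (fun x => x) true,
      ((PySem.Set.ofList ps).map (pvG ps ps.length)).find?
        (fun s => PySem.List.pyGetD ps (PySem.List.pyGetD s 0 0) 0 == w)
        = some (pvG ps ps.length w) := by
    intro w hw
    have hwD : w ∈ PySem.Set.ofList ps := (PySem.List.mem_sorted _ _ _ _).mp hw
    refine pv_find w _ _ _ (fun w' hw' => ?_) hwD
    have hwt : w' ∈ ps.take ps.length := by
      rw [List.take_length]
      exact (PySem.Set.mem_ofList _ _).mp hw'
    rw [pv_cond_G hwt]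
  rw [PySem.List.foldl_congr_mem
    (PySem.List.sorted (PySem.Set.ofList ps) (fun x => x) true)
    (fun acc w =>
      match ((PySem.Set.ofList ps).map (pvG ps ps.length)).find?
          (fun s => PySem.List.pyGetD ps (PySem.List.pyGetD s 0 0) 0 == w) with
      | some s => acc ++ [s]
      | none => acc)
    (fun acc w => acc ++ [pvG ps ps.length w]) []
    (fun acc w hw => by beta_reduce; rw [hsel w hw])]
  rw [PySem.List.foldl_append_singleton_eq_map]
  simp

theorem pv_B_eq (ps : List Int) :
    player_set_partition_alt ps
      = (PySem.List.sorted (PySem.Set.ofList ps) (fun x => x) true).map (pvG ps ps.length) := by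
  simp only [player_set_partition_alt]
  have hmapsnd : (PySem.List.enumerate ps).map (fun p => p.2) = ps := by
    rw [pv_enum_eq, List.map_map]
    refine List.ext_getElem (by simp) (fun i h1 h2 => ?_)
    simp [List.getElem?_eq_getElem h2]
  have hkeys : ((PySem.List.enumerate ps).foldl
      (fun d p => d.modify p.2 [] (fun g => g ++ [p.1])) PySem.Dict.empty).keys
      = PySem.Set.ofList ps := by
    rw [PySem.Dict.keys_foldl_modify_key (PySem.List.enumerate ps) (fun p => p.2) []
      (fun _ p => fun g => g ++ [p.1]) PySem.Dict.empty]
    rw [hmapsnd]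
    rfl
  have hget : ∀ w, ((PySem.List.enumerate ps).foldl
      (fun d p => d.modify p.2 [] (fun g => g ++ [p.1])) PySem.Dict.empty).getD w []
      = pvG ps ps.length w := by
    intro w
    have hsw : (PySem.List.enumerate ps).foldl
        (fun d p => d.modify p.2 [] (fun g => g ++ [p.1])) PySem.Dict.empty
        = ((PySem.List.enumerate ps).map (fun p => (p.2, p.1))).foldl
          (fun d q => d.modify q.1 [] (fun g => g ++ [q.2])) PySem.Dict.empty := by
      rw [List.foldl_map]
    rw [hsw, PySem.Dict.getD_foldl_modify_append, pv_enum_eq0]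
    simp only [List.filter_map, List.map_map, pvG, pvIdx]
    simp [Function.comp_def, ← List.map_eq_flatMap]
  rw [hkeys]
  exact List.map_congr_left (fun w _ => hget w)

-- ===== VERDICT (by name: the statement is the Claim_ definition above) =====
theorem player_set_partition_spec : Claim_equal_player_set_partition := by
  intro ps _
  unfold Spec_player_set_partition
  rw [pv_A_eq, pv_B_eq]
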